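-- pv_equiv track=rewrite | github.com/daniel-reich/ubiquitous-fiesta | 6pFZZ9CdSFDGhvNBc_19.py | factor_group
-- ===== SOURCE A (Python) =====
-- def factor_group(num):
--     l=[]
--     for i in range(1,num+1):
--         if num%i==0:
--             l.append(i)
--         else:
--             pass
--     if len(l)%2==0:
--         return 'even'
--     else:
--         return 'odd'
-- ===== SOURCE B (Python) =====
-- def factor_group(num):
--     # count of divisors is odd iff num is a positive perfect square
--     if num <= 0:
--         return 'even'
--     k = 0
--     while k * k < num:
--         k += 1
--     return 'odd' if k * k == num else 'even'
-- ===== Notes on version B (the rewrite author's own statement) =====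
-- stated objective: faster
-- what changed: Instead of enumerating all num divisors and counting them, B uses the fact that the divisor count is odd iff num is a perfect square, and tests squareness by an incremental integer-square-root search.
import Mathlib
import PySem

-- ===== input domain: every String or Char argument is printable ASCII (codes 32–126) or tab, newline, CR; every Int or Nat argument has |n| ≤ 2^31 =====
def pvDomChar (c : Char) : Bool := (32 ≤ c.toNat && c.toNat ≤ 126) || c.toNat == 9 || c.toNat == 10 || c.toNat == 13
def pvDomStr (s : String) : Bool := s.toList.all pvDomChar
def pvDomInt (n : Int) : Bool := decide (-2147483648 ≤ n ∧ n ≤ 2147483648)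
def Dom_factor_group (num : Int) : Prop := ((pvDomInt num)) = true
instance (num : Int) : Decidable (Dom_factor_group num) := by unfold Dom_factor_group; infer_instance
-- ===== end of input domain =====

-- B replaces the O(num) divisor enumeration by a perfect-square test via an incremental
-- integer-square-root search (divisor count is odd iff num is a perfect square).


-- ===== PORT A =====
def factor_group (num : Int) : String :=
  let l := (PySem.List.pyRange 1 (num + 1) 1).foldl
    (fun l i => if PySem.Int.mod num i == 0 then l ++ [i] else l) ([] : List Int)
  if l.length % 2 == 0 then "even" else "odd"

-- ===== PORT B =====
-- the `while k * k < num: k += 1` loop of Source B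
def fgSearch (num k : Int) : Int :=
  if k * k < num then fgSearch num (k + 1) else k
termination_by (num - k).toNat
decreasing_by
  have hk : k < num := by nlinarith [sq_nonneg (k - 1), sq_nonneg k]
  omega

def factor_group_alt (num : Int) : String :=
  if num ≤ 0 then "even"
  else
    let k := fgSearch num 0
    if k * k == num then "odd" else "even"

-- ===== PRECONDITION & SPEC =====
def Spec_factor_group (num : Int) (out : String) : Prop := out = factor_group_alt num
instance (num : Int) (out : String) : Decidable (Spec_factor_group num out) := by unfold Spec_factor_group; infer_instance

-- ===== CLAIM (what is proved, stated in full; the proofs are below) =====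
def Claim_equal_factor_group : Prop := ∀ (num : Int), Dom_factor_group num → Spec_factor_group num (factor_group num)

-- ===== LEMMAS AND PROOFS =====

-- A's divisor list has the length of the divisor finset
theorem factor_group_len {n : Nat} (hn : 0 < n) :
    ((PySem.List.pyRange 1 ((n : Int) + 1) 1).foldl
      (fun l i => if PySem.Int.mod (n : Int) i == 0 then l ++ [i] else l) ([] : List Int)).length
      = n.divisors.card := by
  rw [PySem.List.foldl_append_if_eq_filter, List.nil_append, ← List.countP_eq_length_filter,
      PySem.List.pyRange_one, List.countP_map]
  have h1 : ((n : Int) + 1 - 1).toNat = n := by omega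
  rw [h1]
  have h3 : List.countP ((fun i => PySem.Int.mod (↑n) i == 0) ∘ fun k : Nat => 1 + (k : Int))
        (List.range n)
      = List.countP (fun k => decide ((1 + k) ∣ n)) (List.range n) := by
    apply List.countP_congr
    intro k _
    simp only [Function.comp]
    have hc : (1 : Int) + (k : Int) = ((1 + k : Nat) : Int) := by push_cast; ring
    rw [hc, PySem.Int.mod_natCast]
    simp only [beq_iff_eq, Int.natCast_eq_zero, decide_eq_true_eq]
    exact Nat.dvd_iff_mod_eq_zero.symm
  rw [h3, Nat.divisors, Nat.Ico_eq_range']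
  have h2 : n + 1 - 1 = n := by omega
  rw [h2, Finset.filter, Finset.card]
  simp only [Multiset.filter_coe, Multiset.coe_card, ← List.countP_eq_length_filter,
    List.range'_eq_map_range, List.countP_map]
  rfl

-- the classical parity fact: the divisor count of n > 0 is odd iff n is a perfect square
theorem divisors_card_odd_iff {n : Nat} (hn : 0 < n) :
    n.divisors.card % 2 = 1 ↔ IsSquare n := by
  have hn0 : n ≠ 0 := hn.ne'
  set s := n.divisors with hs
  set lo := s.filter (fun d => d * d < n) with hlo
  set eqf := s.filter (fun d => d * d = n) with heqf
  set hi := s.filter (fun d => n < d * d) with hhi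
  have hsplit : s.card = lo.card + (eqf.card + hi.card) := by
    rw [← Finset.card_filter_add_card_filter_not (s := s) (p := fun d => d * d < n)]
    congr 1
    rw [← Finset.card_filter_add_card_filter_not
        (s := s.filter (fun d => ¬ d * d < n)) (p := fun d => d * d = n)]
    congr 1
    · rw [Finset.filter_filter]
      congr 1
      ext a
      simp only [Finset.mem_filter, heqf]
      constructor
      · rintro ⟨h1, _, h3⟩; exact ⟨h1, h3⟩
      · rintro ⟨h1, h3⟩; exact ⟨h1, by omega, h3⟩
    · rw [Finset.filter_filter]
      congr 1
      ext a
      simp only [Finset.mem_filter, hhi]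
      constructor
      · rintro ⟨h1, h2, h3⟩; exact ⟨h1, by omega⟩
      · rintro ⟨h1, h3⟩; exact ⟨h1, by omega, by omega⟩
  -- the pairing d ↦ n / d matches the divisors below √n with those above it
  have key : ∀ d ∈ lo, n / d ∈ hi ∧ n / (n / d) = d := by
    intro d hd
    rw [hlo, Finset.mem_filter, Nat.mem_divisors] at hd
    obtain ⟨⟨hdvd, _⟩, hlt⟩ := hd
    have hdpos : 0 < d := Nat.pos_of_dvd_of_pos hdvd hn
    obtain ⟨e, he⟩ := hdvd
    have hepos : 0 < e := by by_contra h; push Not at h; interval_cases e; omega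
    have hde : n / d = e := by rw [he, Nat.mul_div_cancel_left _ hdpos]
    have hdlte : d < e := by nlinarith
    refine ⟨?_, ?_⟩
    · rw [hhi, Finset.mem_filter, Nat.mem_divisors, hde]
      exact ⟨⟨Dvd.intro_left d he.symm, hn0⟩, by nlinarith⟩
    · rw [hde, he, Nat.mul_div_cancel _ hepos]
  have key2 : ∀ e ∈ hi, n / e ∈ lo ∧ n / (n / e) = e := by
    intro e hee
    rw [hhi, Finset.mem_filter, Nat.mem_divisors] at hee
    obtain ⟨⟨hdvd, _⟩, hlt⟩ := hee
    have hepos : 0 < e := Nat.pos_of_dvd_of_pos hdvd hn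
    obtain ⟨d, hd⟩ := hdvd
    have hdpos : 0 < d := by by_contra h; push Not at h; interval_cases d; omega
    have hed : n / e = d := by rw [hd, Nat.mul_div_cancel_left _ hepos]
    have hdlt : d < e := by nlinarith
    refine ⟨?_, ?_⟩
    · rw [hlo, Finset.mem_filter, Nat.mem_divisors, hed]
      exact ⟨⟨Dvd.intro_left e hd.symm, hn0⟩, by nlinarith⟩
    · rw [hed, hd, Nat.mul_div_cancel _ hdpos]
  have hpair : lo.card = hi.card :=
    Finset.card_bij' (fun d _ => n / d) (fun e _ => n / e)
      (fun d hd => (key d hd).1) (fun e hee => (key2 e hee).1)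
      (fun d hd => (key d hd).2) (fun e hee => (key2 e hee).2)
  by_cases hsq : IsSquare n
  · obtain ⟨r, hr⟩ := hsq
    have hrpos : 0 < r := by nlinarith
    have hr1 : eqf = {r} := by
      apply Finset.eq_singleton_iff_unique_mem.mpr
      refine ⟨?_, ?_⟩
      · rw [heqf, Finset.mem_filter, Nat.mem_divisors]
        exact ⟨⟨Dvd.intro_left r hr.symm, hn0⟩, hr.symm⟩
      · intro d hd
        rw [heqf, Finset.mem_filter] at hd
        have : d * d = r * r := by omega
        nlinarith [Nat.le_total d r]
    rw [hr1] at hsplit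
    simp only [Finset.card_singleton] at hsplit
    exact ⟨fun _ => ⟨r, hr⟩, fun _ => by omega⟩
  · have hr0 : eqf = ∅ := by
      rw [Finset.eq_empty_iff_forall_notMem]
      intro d hd
      rw [heqf, Finset.mem_filter] at hd
      exact hsq ⟨d, hd.2.symm⟩
    rw [hr0] at hsplit
    simp only [Finset.card_empty] at hsplit
    exact ⟨fun h => by omega, fun h => absurd h hsq⟩

-- fgSearch stays ≥ its start
theorem fgSearch_ge (num k : Int) : k ≤ fgSearch num k := by
  induction k using fgSearch.induct (num := num) with
  | case1 k h ih => rw [fgSearch, if_pos h]; omega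
  | case2 k h => rw [fgSearch, if_neg h]

-- if num = r * r with k ≤ r, the search stops exactly at r
theorem fgSearch_eq_root {num k r : Int} (hk : k ≤ r) (h0 : 0 ≤ k) (hr : num = r * r) :
    fgSearch num k = r := by
  induction k using fgSearch.induct (num := num) with
  | case1 k h ih =>
    rw [fgSearch, if_pos h]
    have hkr : k ≠ r := by rintro rfl; omega
    exact ih (by omega) (by omega)
  | case2 k h =>
    rw [fgSearch, if_neg h]
    nlinarith

-- ===== VERDICT (by name: the statement is the Claim_ definition above) =====
theorem factor_group_spec : Claim_equal_factor_group := by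
  intro num _
  unfold Spec_factor_group factor_group factor_group_alt
  by_cases h : num ≤ 0
  · rw [if_pos h, PySem.List.pyRange_one_eq_nil (by omega)]
    simp
  · rw [if_neg h]
    have hnum : num = (num.toNat : Int) := by omega
    have hnpos : 0 < num.toNat := by omega
    set n := num.toNat with hn
    rw [hnum]
    simp only [factor_group_len hnpos]
    by_cases hsq : IsSquare n
    · obtain ⟨r, hr⟩ := hsq
      have hsr : fgSearch (n : Int) 0 = (r : Int) :=
        fgSearch_eq_root (by positivity) le_rfl (by push_cast [hr]; ring)
      have hodd : n.divisors.card % 2 = 1 := (divisors_card_odd_iff hnpos).mpr ⟨r, hr⟩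
      rw [if_neg (by simp [hodd]), hsr, if_pos (by simp only [beq_iff_eq]; exact_mod_cast hr.symm)]
    · have hne : ¬ (fgSearch (n : Int) 0 * fgSearch (n : Int) 0 == (n : Int)) = true := by
        intro hcontra
        simp only [beq_iff_eq] at hcontra
        have hge : (0 : Int) ≤ fgSearch (n : Int) 0 := fgSearch_ge _ _
        have htn : ((fgSearch (n : Int) 0).toNat : Int) = fgSearch (n : Int) 0 :=
          Int.toNat_of_nonneg hge
        exact hsq ⟨(fgSearch (n : Int) 0).toNat, by exact_mod_cast (htn ▸ hcontra).symm⟩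
      have heven : n.divisors.card % 2 = 0 := by
        have := (divisors_card_odd_iff hnpos).not.mpr hsq
        omega
      rw [if_pos (by simp [heven]), if_neg hne]
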